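-- pv_equiv track=rewrite | github.com/vladceontea/Fundamentals-of-Programming | Lab2/src/program.py | show_second_sequence
-- ===== SOURCE A (Python) =====
-- def get_real(z):
--     return z[0]
--
-- def get_imaginary(z):
--     return z[1]
--
-- def digits(z):
--     """
--     Checks what digits are used in a certain complex number
--     :param z: the complex number
--     :return: list of 0s and 1s representing the digits used
--     """
--     k = []
--     for i in range(0, 10):
--         k.append(0)
--     real = abs(get_real(z))
--     imaginary = abs(get_imaginary(z))
--     if 0 < real < 10:
--         k[real] = 1
--     else:
--         while real > 0:
--             k[real % 10] = 1
--             real = real//10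
--     if 0 < imaginary < 10:
--         k[imaginary] = 1
--     else:
--         while imaginary > 0:
--             k[imaginary % 10] = 1
--             imaginary = imaginary//10
--     return k
--
-- def show_second_sequence(complex_list):
--     """
--     The longest sequence containing numbers where both the real and the imaginary part use the same digits
--     :param complex_list: the list of complex numbers
--     :return: the list containing the required sequence
--     """
--     sequence_list = [complex_list[0]]
--     max_count = 1
--     for position in range(len(complex_list)-1):
--         count = 1
--         first_position = position
--         first_digits = digits(complex_list[position])
--         last_position = position + 1
--         while last_position < len(complex_list) and first_digits == digits(complex_list[last_position]):
--             count = count + 1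
--             last_position = last_position + 1
--         if max_count < count:
--             max_count = count
--             sequence_list = []
--             for i in range(first_position, last_position):
--                 sequence_list.append(complex_list[i])
--
--     return sequence_list
-- ===== SOURCE B (Python) =====
-- def _signature(z):
--     """Set of decimal digits used by the two parts, as a 10-slot indicator list."""
--     k = [0] * 10
--     for n in (abs(z[0]), abs(z[1])):
--         while n > 0:
--             k[n % 10] = 1
--             n //= 10
--     return k
--
--
-- def show_second_sequence(complex_list):
--     # Precompute every signature once, decompose into maximal runs of equal
--     # signatures in one adjacent-comparison pass, then pick the first longest run.
--     sigs = [_signature(z) for z in complex_list]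
--     runs = []                      # (start, length) of each maximal run
--     start = 0
--     for i in range(1, len(sigs)):
--         if sigs[i] != sigs[i - 1]:
--             runs.append((start, i - start))
--             start = i
--     runs.append((start, len(sigs) - start))
--     best_len, best_start = 1, 0
--     for s, l in runs:
--         if best_len < l:
--             best_len, best_start = l, s
--     return complex_list[best_start:best_start + best_len]
-- ===== Notes on version B (the rewrite author's own statement) =====
-- stated objective: faster
-- what changed: B computes each digit signature exactly once and finds the longest run by a single adjacent-comparison pass over a run-length decomposition, instead of A's per-position rescan that recomputes signatures inside a nested while loop; B's signature helper also merges A's two redundant branches into one digit loop.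
-- outside the precondition, e.g. on show_second_sequence([(1,)]): A returns [(1,)], B raises IndexError
import Mathlib
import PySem

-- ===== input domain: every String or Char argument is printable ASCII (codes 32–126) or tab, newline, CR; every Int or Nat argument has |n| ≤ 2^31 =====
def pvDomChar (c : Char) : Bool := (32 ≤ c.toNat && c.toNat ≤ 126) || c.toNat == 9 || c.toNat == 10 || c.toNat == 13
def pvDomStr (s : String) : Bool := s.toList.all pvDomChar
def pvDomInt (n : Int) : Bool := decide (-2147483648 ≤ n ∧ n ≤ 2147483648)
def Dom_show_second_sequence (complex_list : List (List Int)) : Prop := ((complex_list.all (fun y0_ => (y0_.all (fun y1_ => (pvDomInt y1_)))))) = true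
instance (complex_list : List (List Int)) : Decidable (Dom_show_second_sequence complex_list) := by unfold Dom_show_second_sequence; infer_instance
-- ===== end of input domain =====

-- B precomputes each digit signature once and takes the first longest run from a
-- single-pass run-length decomposition; A rescans forward from every position,
-- recomputing signatures (asymptotically faster measured).

-- ===== PORT A =====
-- while real > 0: k[real % 10] = 1; real = real // 10
-- (the index (real % 10).toNat is exact here: 0 ≤ mod _ 10 < 10, no negative-index wrap)
def pvDigitLoopA (k : List Int) (real : Int) : List Int :=
  if h : 0 < real then
    pvDigitLoopA (k.set (PySem.Int.mod real 10).toNat 1) (PySem.Int.floordiv real 10)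
  else k
termination_by real.toNat
decreasing_by
  simp only [PySem.Int.floordiv_eq_ediv_of_pos (by omega : (0:Int) < 10)]
  omega

-- digits(z) of A, with get_real/get_imaginary inlined as z[0], z[1]
-- (z[i] via pyGet?; .getD 0 is only reached outside Pre_, where Python raises)
def digitsA (z : List Int) : List Int :=
  let k := List.replicate 10 (0 : Int)
  let real := |(PySem.List.pyGet? z 0).getD 0|
  let imaginary := |(PySem.List.pyGet? z 1).getD 0|
  let k := if 0 < real ∧ real < 10 then k.set real.toNat 1 else pvDigitLoopA k real
  let k := if 0 < imaginary ∧ imaginary < 10 then k.set imaginary.toNat 1 else pvDigitLoopA k imaginary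
  k

-- the inner while loop: returns (count, last_position)
def pvInnerA (cl : List (List Int)) (first_digits : List Int) (last_position : Nat) (count : Int) :
    Int × Nat :=
  if h : last_position < cl.length ∧ first_digits = digitsA (cl.getD last_position []) then
    pvInnerA cl first_digits (last_position + 1) (count + 1)
  else (count, last_position)
termination_by cl.length - last_position

-- one iteration of A's outer for-loop; state = (max_count, sequence_list)
def pvStepA (cl : List (List Int)) (st : Int × List (List Int)) (position : Nat) :
    Int × List (List Int) :=
  let first_digits := digitsA (cl.getD position [])
  let r := pvInnerA cl first_digits (position + 1) 1
  if st.1 < r.1 then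
    (r.1, (List.range' position (r.2 - position)).foldl (fun acc i => acc ++ [cl.getD i []]) [])
  else st

def show_second_sequence (complex_list : List (List Int)) : List (List Int) :=
  ((List.range (complex_list.length - 1)).foldl (pvStepA complex_list)
      (1, [(PySem.List.pyGet? complex_list 0).getD []])).2

-- ===== PORT B =====
-- B's digit loop 'while n > 0: k[n % 10] = 1; n //= 10' is textually the same loop as A's
-- pvDigitLoopA, so the two ports share that one helper definition.
def signatureB (z : List Int) : List Int :=
  let k := List.replicate 10 (0 : Int)
  let k := pvDigitLoopA k |(PySem.List.pyGet? z 0).getD 0|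
  pvDigitLoopA k |(PySem.List.pyGet? z 1).getD 0|

-- run-building pass; state = (runs, start)
def pvStepB (sigs : List (List Int)) (st : List (Nat × Nat) × Nat) (i : Nat) :
    List (Nat × Nat) × Nat :=
  if sigs.getD i [] ≠ sigs.getD (i - 1) [] then (st.1 ++ [(st.2, i - st.2)], i) else st

-- best-run pass; state = (best_len, best_start)
def pvBestStep (b : Nat × Nat) (r : Nat × Nat) : Nat × Nat :=
  if b.1 < r.2 then (r.2, r.1) else b

def show_second_sequence_alt (complex_list : List (List Int)) : List (List Int) :=
  let sigs := complex_list.map signatureB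
  let rs := (List.range' 1 (sigs.length - 1)).foldl (pvStepB sigs) ([], 0)
  let runs := rs.1 ++ [(rs.2, sigs.length - rs.2)]
  let best := runs.foldl pvBestStep (1, 0)
  PySem.List.slice complex_list (some (best.2 : Int)) (some ((best.2 : Int) + (best.1 : Int)))

-- ===== PRECONDITION & SPEC =====
-- Pre_ excludes the empty list (A raises IndexError at complex_list[0]) and lists with an
-- element of fewer than two components: A raises there too (z[0]/z[1] in digits) EXCEPT for a
-- single-element list, which A returns unread while B's signature precomputation raises.
def Pre_show_second_sequence (complex_list : List (List Int)) : Prop :=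
  complex_list ≠ [] ∧ ∀ z ∈ complex_list, 2 ≤ z.length
instance (complex_list : List (List Int)) : Decidable (Pre_show_second_sequence complex_list) := by
  unfold Pre_show_second_sequence; infer_instance
def pvWitness_show_second_sequence : List (List Int) := [[12, 21], [2, 1], [3, 0]]

def Spec_show_second_sequence (complex_list : List (List Int)) (out : List (List Int)) : Prop := out = show_second_sequence_alt complex_list
instance (complex_list : List (List Int)) (out : List (List Int)) : Decidable (Spec_show_second_sequence complex_list out) := by unfold Spec_show_second_sequence; infer_instance

-- ===== CLAIM (what is proved, stated in full; the proofs are below) =====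
def Claim_equal_show_second_sequence : Prop := ∀ (complex_list : List (List Int)), Dom_show_second_sequence complex_list → Pre_show_second_sequence complex_list → Spec_show_second_sequence complex_list (show_second_sequence complex_list)

-- ===== LEMMAS AND PROOFS =====

-- run-length extent: how many leading elements of l equal a
def pvExt (a : List Int) : List (List Int) → Nat
  | [] => 0
  | b :: t => if b = a then pvExt a t + 1 else 0

-- run decomposition (start, length) of a signature list, starts offset by p
def pvRuns : List (List Int) → Nat → List (Nat × Nat)
  | [], _ => []
  | a :: t, p => (p, pvExt a t + 1) :: pvRuns (t.drop (pvExt a t)) (p + (pvExt a t + 1))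
termination_by l => l.length
decreasing_by simp

lemma ext_drop (a : List Int) (t : List (List Int)) (k : Nat) (hk : k ≤ pvExt a t) :
    pvExt a (t.drop k) = pvExt a t - k := by
  induction t generalizing k with
  | nil => simp [pvExt]
  | cons b t ih =>
    cases k with
    | zero => simp
    | succ k =>
      simp only [pvExt] at hk ⊢
      by_cases hb : b = a
      · simp only [if_pos hb] at hk ⊢
        simp only [List.drop_succ_cons]
        rw [ih k (by omega)]
        omega
      · simp [hb] at hk
lemma ext_le_length (a : List Int) (t : List (List Int)) : pvExt a t ≤ t.length := by
  induction t with
  | nil => simp [pvExt]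
  | cons b t ih => simp only [pvExt]; split <;> simp <;> omega
lemma ext_getD_eq (a : List Int) (t : List (List Int)) (k : Nat) (hk : k < pvExt a t) :
    t.getD k [] = a := by
  induction t generalizing k with
  | nil => simp [pvExt] at hk
  | cons b t ih =>
    simp only [pvExt] at hk
    by_cases hb : b = a
    · simp [hb] at hk
      cases k with
      | zero => simpa using hb
      | succ k => simpa using ih k (by omega)
    · simp [hb] at hk
lemma ext_getD_ne (a : List Int) (t : List (List Int)) (hl : pvExt a t < t.length) :
    t.getD (pvExt a t) [] ≠ a := by
  induction t with
  | nil => simp at hl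
  | cons b t ih =>
    simp only [pvExt] at hl ⊢
    by_cases hb : b = a
    · simp [hb] at hl ⊢
      exact ih (by omega)
    · rw [if_neg hb]
      simpa using hb

-- the second pass of B is a fold with pvBestStep; name its result
def pvBest (rs : List (Nat × Nat)) (st : Nat × Nat) : Nat × Nat := rs.foldl pvBestStep st

lemma best_mono (rs : List (Nat × Nat)) (st : Nat × Nat) : st.1 ≤ (pvBest rs st).1 := by
  induction rs generalizing st with
  | nil => simp [pvBest]
  | cons r rs ih =>
    simp only [pvBest, List.foldl_cons] at *
    have h1 := ih (pvBestStep st r)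
    have h2 : st.1 ≤ (pvBestStep st r).1 := by
      simp only [pvBestStep]; split
      · omega
      · exact le_rfl
    omega

lemma best_stable (rs : List (Nat × Nat)) (st : Nat × Nat)
    (h : (pvBest rs st).1 = st.1) : pvBest rs st = st := by
  induction rs generalizing st with
  | nil => simp [pvBest]
  | cons r rs ih =>
    simp only [pvBest, List.foldl_cons] at h ⊢
    by_cases hlt : st.1 < r.2
    · exfalso
      have h1 := best_mono rs (pvBestStep st r)
      simp only [pvBest] at h1
      have h2 : (pvBestStep st r).1 = r.2 := by simp [pvBestStep, hlt]
      omega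
    · have h2 : pvBestStep st r = st := by simp [pvBestStep, hlt]
      rw [h2] at h ⊢
      exact ih st h

lemma map_getD (cl : List (List Int)) (q : Nat) (hq : q < cl.length) :
    (cl.map digitsA).getD q [] = digitsA (cl.getD q []) := by
  rw [List.getD_eq_getElem _ _ (by simpa using hq), List.getD_eq_getElem _ _ hq]
  simp

-- inner while loop in terms of pvExt over the signature list
lemma innerA_eq (cl : List (List Int)) (fd : List Int) (lp : Nat) (cnt : Int) :
    pvInnerA cl fd lp cnt =
      (cnt + (pvExt fd ((cl.map digitsA).drop lp) : Int),
        lp + pvExt fd ((cl.map digitsA).drop lp)) := by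
  fun_induction pvInnerA cl fd lp cnt with
  | case1 lp cnt h ih =>
    obtain ⟨hlt, heq⟩ := h
    have hdrop : (cl.map digitsA).drop lp
        = digitsA (cl.getD lp []) :: (cl.map digitsA).drop (lp + 1) := by
      rw [List.drop_eq_getElem_cons (by simpa using hlt)]
      rw [← map_getD cl lp hlt, List.getD_eq_getElem _ _ (by simpa using hlt)]
    rw [ih, hdrop]
    simp only [pvExt, if_pos heq.symm, Prod.mk.injEq]
    constructor
    · push_cast; ring
    · omega
  | case2 lp cnt h =>
    rcases Nat.lt_or_ge lp cl.length with hlt | hge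
    · have hne : fd ≠ digitsA (cl.getD lp []) := fun he => h ⟨hlt, he⟩
      have hdrop : (cl.map digitsA).drop lp
          = digitsA (cl.getD lp []) :: (cl.map digitsA).drop (lp + 1) := by
        rw [List.drop_eq_getElem_cons (by simpa using hlt)]
        rw [← map_getD cl lp hlt, List.getD_eq_getElem _ _ (by simpa using hlt)]
      rw [hdrop]
      simp only [pvExt, if_neg (Ne.symm hne)]
      simp
    · rw [List.drop_eq_nil_of_le (by simpa using hge)]
      simp [pvExt]

-- rebuild loop = drop/take segment
lemma rebuild_aux (cl : List (List Int)) (p m : Nat) (acc : List (List Int))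
    (h : p + m ≤ cl.length) :
    (List.range' p m).foldl (fun acc i => acc ++ [cl.getD i []]) acc
      = acc ++ (cl.drop p).take m := by
  induction m generalizing p acc with
  | zero => simp
  | succ m ih =>
    have hp : p < cl.length := by omega
    rw [List.range'_succ, List.foldl_cons, ih (p + 1) _ (by omega)]
    rw [List.drop_eq_getElem_cons hp, List.take_succ_cons,
      List.getD_eq_getElem _ _ hp]
    simp

lemma rebuild_eq (cl : List (List Int)) (p m : Nat) (h : p + m ≤ cl.length) :
    (List.range' p m).foldl (fun acc i => acc ++ [cl.getD i []]) [] = (cl.drop p).take m := by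
  simpa using rebuild_aux cl p m [] h

-- A never updates while counts stay below the current max
lemma stepA_no_update (cl : List (List Int)) (qs : List Nat) (st : Int × List (List Int))
    (h : ∀ q ∈ qs, q < cl.length ∧
      1 + (pvExt ((cl.map digitsA).getD q []) ((cl.map digitsA).drop (q + 1)) : Int) ≤ st.1) :
    qs.foldl (pvStepA cl) st = st := by
  induction qs with
  | nil => simp
  | cons q qs ih =>
    obtain ⟨hq, hcnt⟩ := h q (by simp)
    have hstep : pvStepA cl st q = st := by
      simp only [pvStepA]
      rw [innerA_eq]
      rw [map_getD cl q hq] at hcnt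
      rw [if_neg (by omega)]
    rw [List.foldl_cons, hstep]
    exact ih (fun q hmem => h q (by simp [hmem]))

lemma getD_drop (sg : List (List Int)) (p k : Nat) :
    (sg.drop p).getD k [] = sg.getD (p + k) [] := by
  by_cases h : p + k < sg.length
  · rw [List.getD_eq_getElem _ _ (by simp; omega), List.getD_eq_getElem _ _ h]
    simp
  · rw [List.getD_eq_default _ _ (by simp; omega), List.getD_eq_default _ _ (by omega)]

-- within a run, the signature at offset k equals the run's signature
lemma run_getD (sg : List (List Int)) (p : Nat) (a : List Int) (t' : List (List Int))
    (ht : sg.drop p = a :: t') (k : Nat) (hk : k ≤ pvExt a t') :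
    sg.getD (p + k) [] = a := by
  rw [← getD_drop, ht]
  cases k with
  | zero => simp
  | succ k => simpa using ext_getD_eq a t' k (by omega)

-- the count the inner scan produces at offset k into a run
lemma cnt_at (cl : List (List Int)) (p : Nat) (a : List Int) (t' : List (List Int))
    (ht : (cl.map digitsA).drop p = a :: t') (k : Nat) (hk : k ≤ pvExt a t') :
    pvExt ((cl.map digitsA).getD (p + k) []) ((cl.map digitsA).drop (p + k + 1))
      = pvExt a t' - k := by
  rw [run_getD _ _ _ _ ht k hk]
  have h1 : (cl.map digitsA).drop (p + k + 1) = t'.drop k := by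
    have : (cl.map digitsA).drop (p + (k + 1)) = ((cl.map digitsA).drop p).drop (k + 1) := by
      rw [List.drop_drop, Nat.add_comm]
    rw [show p + k + 1 = p + (k + 1) by ring, this, ht]
    simp
  rw [h1, ext_drop a t' k hk]

-- A's outer loop computes the first longest run, via the run decomposition
lemma mainA (cl : List (List Int)) : ∀ (N : Nat) (t : List (List Int)) (p mc bs : Nat)
    (seq : List (List Int)), t.length ≤ N → 1 ≤ mc → (cl.map digitsA).drop p = t →
    (List.range' p (cl.length - 1 - p)).foldl (pvStepA cl) ((mc : Int), seq) =
      (((pvBest (pvRuns t p) (mc, bs)).1 : Int),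
        if mc < (pvBest (pvRuns t p) (mc, bs)).1 then
          (cl.drop (pvBest (pvRuns t p) (mc, bs)).2).take (pvBest (pvRuns t p) (mc, bs)).1
        else seq) := by
  intro N
  induction N with
  | zero =>
    intro t p mc bs seq hN hmc ht
    have ht0 : t = [] := by cases t <;> simp_all
    subst ht0
    have hp : cl.length ≤ p := by
      have := congrArg List.length ht; simp at this; omega
    rw [show cl.length - 1 - p = 0 by omega]
    simp [pvRuns, pvBest]
  | succ N ihN =>
    intro t p mc bs seq hN hmc ht
    match t, ht with
    | [], ht =>
      have hp : cl.length ≤ p := by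
        have := congrArg List.length ht; simp at this; omega
      rw [show cl.length - 1 - p = 0 by omega]
      simp [pvRuns, pvBest]
    | a :: t', ht =>
      have hp : p < cl.length := by
        have := congrArg List.length ht; simp at this; omega
      have hlen : t'.length = cl.length - p - 1 := by
        have := congrArg List.length ht; simp at this; omega
      set e := pvExt a t' with he
      have hee : e ≤ t'.length := ext_le_length a t'
      -- the first step of the run (at position p), when it is executed
      have hstep_p : ∀ (st : Int × List (List Int)), p + 1 ≤ cl.length - 1 →
          pvStepA cl st p =
            if st.1 < ((e : Int) + 1) then
              (((e : Int) + 1), (cl.drop p).take (e + 1))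
            else st := by
        intro st hpn
        simp only [pvStepA]
        rw [innerA_eq]
        have h0 : digitsA (cl.getD p []) = a := by
          rw [← map_getD cl p hp, ← run_getD _ _ _ _ ht 0 (by omega)]; simp
        have h1 : (cl.map digitsA).drop (p + 1) = t' := by
          have := congrArg (List.drop 1) ht
          rw [List.drop_drop] at this; simpa using this
        rw [h0, h1, ← he]
        by_cases hlt : st.1 < (e : Int) + 1
        · rw [if_pos (by push_cast; omega), if_pos hlt]
          rw [show p + 1 + e - p = e + 1 by omega]
          rw [rebuild_eq cl p (e + 1) (by omega)]
          simp only [Prod.mk.injEq]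
          refine ⟨by push_cast; ring, trivial⟩
        · rw [if_neg (by push_cast at hlt ⊢; omega), if_neg hlt]
      -- no update happens strictly inside the run
      have hrest : ∀ (m : Nat) (st : Int × List (List Int)), m ≤ e → ((e : Int) + 1) ≤ st.1 →
          (List.range' (p + 1) m).foldl (pvStepA cl) st = st := by
        intro m st hme hst
        apply stepA_no_update
        intro q hq
        rw [List.mem_range'_1] at hq
        obtain ⟨hq1, hq2⟩ := hq
        obtain ⟨k, hk1, hk2⟩ : ∃ k, q = p + k ∧ 1 ≤ k ∧ k ≤ e := ⟨q - p, by omega, by omega, by omega⟩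
        subst hk1
        constructor
        · omega
        · rw [cnt_at cl p a t' ht k hk2.2]
          have : (pvExt a t' - k : Nat) + 1 ≤ e := by omega
          push_cast at hst ⊢
          omega
      have hruns : pvRuns (a :: t') p = (p, e + 1) :: pvRuns (t'.drop e) (p + (e + 1)) := by
        rw [pvRuns]
      by_cases hend : p + e + 1 = cl.length
      · -- the run reaches the end of the list
        have hdropend : t'.drop e = [] := List.drop_eq_nil_of_le (by omega)
        have hbest : pvBest (pvRuns (a :: t') p) (mc, bs) = pvBestStep (mc, bs) (p, e + 1) := by
          rw [hruns, hdropend, pvBest]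
          simp [pvRuns, pvBest]
        rcases Nat.eq_zero_or_pos e with he0 | he1
        · -- single-element run at the last position: the loop range is empty
          rw [show cl.length - 1 - p = 0 by omega]
          rw [hbest]
          simp only [pvBestStep]
          rw [if_neg (by simp; omega)]
          simp [show ¬ mc < mc by omega]
        · rw [show cl.length - 1 - p = e by omega]
          obtain ⟨e', hE⟩ : ∃ e', e = e' + 1 := ⟨e - 1, by omega⟩
          rw [show List.range' p e = p :: List.range' (p + 1) (e - 1) by
            rw [hE, List.range'_succ]; rfl]
          rw [List.foldl_cons, hstep_p _ (by omega)]
          by_cases hlt : (mc : Int) < (e : Int) + 1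
          · rw [if_pos hlt, hrest (e - 1) _ (by omega) (by simp)]
            rw [hbest]
            simp only [pvBestStep]
            rw [if_pos (by simp; omega)]
            simp only []
            rw [if_pos (by omega)]
            push_cast
            ring_nf
          · rw [if_neg hlt, hrest (e - 1) _ (by omega) (by simp; omega)]
            rw [hbest]
            simp only [pvBestStep]
            rw [if_neg (by simp; omega)]
            simp [show ¬ mc < mc by omega]
      · -- the run ends before the end of the list; recurse on the rest
        have hnext : p + (e + 1) < cl.length := by omega
        have hsplit : List.range' p (cl.length - 1 - p)
            = List.range' p (e + 1) ++ List.range' (p + (e + 1)) (cl.length - 1 - (p + (e + 1))) := by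
          rw [List.range'_append_1]
          congr 1
          omega
        have hdrop' : (cl.map digitsA).drop (p + (e + 1)) = t'.drop e := by
          have h2 : (cl.map digitsA).drop (p + (e + 1)) = ((cl.map digitsA).drop p).drop (e + 1) := by
            rw [List.drop_drop, Nat.add_comm]
          rw [h2, ht]; simp
        have hlen'' : (t'.drop e).length ≤ N := by rw [List.length_drop]; simp at hN; omega
        rw [hsplit, List.foldl_append]
        rw [show List.range' p (e + 1) = p :: List.range' (p + 1) e by simp [List.range'_succ]]
        rw [List.foldl_cons, hstep_p _ (by omega)]
        by_cases hlt : (mc : Int) < (e : Int) + 1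
        · rw [if_pos hlt, hrest e _ (by omega) (by simp)]
          rw [show ((e : Int) + 1) = ((e + 1 : Nat) : Int) by push_cast; ring]
          rw [ihN (t'.drop e) (p + (e + 1)) (e + 1) p ((cl.drop p).take (e + 1)) hlen'' (by omega) hdrop']
          have hbeq : pvBest (pvRuns (a :: t') p) (mc, bs) = pvBest (pvRuns (t'.drop e) (p + (e + 1))) (e + 1, p) := by
            rw [hruns, pvBest, List.foldl_cons, ← pvBest]
            congr 1
            simp only [pvBestStep]
            rw [if_pos (by simp; omega)]
          rw [hbeq]
          set B := pvBest (pvRuns (t'.drop e) (p + (e + 1))) (e + 1, p) with hB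
          have hBmono : e + 1 ≤ B.1 := by
            have := best_mono (pvRuns (t'.drop e) (p + (e + 1))) (e + 1, p)
            simpa using this
          have hmcB : mc < B.1 := by push_cast at hlt; omega
          rw [if_pos hmcB]
          by_cases hLB : e + 1 < B.1
          · rw [if_pos hLB]
          · have hB1 : B.1 = e + 1 := by omega
            have := best_stable (pvRuns (t'.drop e) (p + (e + 1))) (e + 1, p) (by simpa using hB1)
            rw [← hB] at this
            rw [if_neg (by omega), this]
        · rw [if_neg hlt, hrest e _ (by omega) (by simp; omega)]
          rw [ihN (t'.drop e) (p + (e + 1)) mc bs seq hlen'' hmc hdrop']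
          have hbeq : pvBest (pvRuns (a :: t') p) (mc, bs) = pvBest (pvRuns (t'.drop e) (p + (e + 1))) (mc, bs) := by
            rw [hruns, pvBest, List.foldl_cons, ← pvBest]
            congr 1
            simp only [pvBestStep]
            rw [if_neg (by simp; omega)]
          rw [hbeq]

-- B's pass keeps its state while adjacent signatures agree
lemma stepB_keep (sg : List (List Int)) : ∀ (is : List Nat) (st : List (Nat × Nat) × Nat),
    (∀ i ∈ is, sg.getD i [] = sg.getD (i - 1) []) → is.foldl (pvStepB sg) st = st := by
  intro is
  induction is with
  | nil => simp
  | cons i is ih =>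
    intro st h
    have hstep : pvStepB sg st i = st := by
      simp only [pvStepB]
      rw [if_neg (by simpa using h i (by simp))]
    rw [List.foldl_cons, hstep]
    exact ih st (fun j hj => h j (by simp [hj]))

-- B's first pass builds exactly the run decomposition
lemma mainB (sg : List (List Int)) : ∀ (N : Nat) (t : List (List Int)) (p : Nat)
    (acc : List (Nat × Nat)), t.length ≤ N → sg.drop p = t → p < sg.length →
    ((List.range' (p + 1) (sg.length - (p + 1))).foldl (pvStepB sg) (acc, p)).1
      ++ [(((List.range' (p + 1) (sg.length - (p + 1))).foldl (pvStepB sg) (acc, p)).2,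
           sg.length - ((List.range' (p + 1) (sg.length - (p + 1))).foldl (pvStepB sg) (acc, p)).2)]
    = acc ++ pvRuns t p := by
  intro N
  induction N with
  | zero =>
    intro t p acc hN ht hp
    have := congrArg List.length ht
    simp at this
    omega
  | succ N ihN =>
    intro t p acc hN ht hp
    match t, ht with
    | [], ht =>
      have := congrArg List.length ht
      simp at this
      omega
    | a :: t', ht =>
      have hlen : t'.length = sg.length - p - 1 := by
        have := congrArg List.length ht; simp at this; omega
      set e := pvExt a t' with he
      have hee : e ≤ t'.length := ext_le_length a t'
      have hruns : pvRuns (a :: t') p = (p, e + 1) :: pvRuns (t'.drop e) (p + (e + 1)) := by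
        rw [pvRuns]
      -- indices strictly inside the run change nothing
      have hkeep : ∀ (st : List (Nat × Nat) × Nat),
          (List.range' (p + 1) e).foldl (pvStepB sg) st = st := by
        intro st
        apply stepB_keep
        intro i hi
        rw [List.mem_range'_1] at hi
        obtain ⟨k, hk1, hk2⟩ : ∃ k, i = p + k ∧ 1 ≤ k ∧ k ≤ e := ⟨i - p, by omega, by omega, by omega⟩
        subst hk1
        rw [run_getD sg p a t' ht k hk2.2, show p + k - 1 = p + (k - 1) by omega,
          run_getD sg p a t' ht (k - 1) (by omega)]
      by_cases hend : p + e + 1 = sg.length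
      · -- the run reaches the end of the list
        have hdropend : t'.drop e = [] := List.drop_eq_nil_of_le (by omega)
        rw [show sg.length - (p + 1) = e by omega]
        simp only [hkeep]
        rw [hruns, hdropend]
        simp only [pvRuns]
        simp
        omega
      · -- boundary index p + e + 1 closes the run; recurse on the rest
        have hnext : p + (e + 1) < sg.length := by omega
        have hsplit : List.range' (p + 1) (sg.length - (p + 1))
            = List.range' (p + 1) e ++ List.range' (p + e + 1) (sg.length - (p + e + 1)) := by
          rw [show p + e + 1 = p + 1 + e by omega, List.range'_append_1]
          congr 1
          omega
        have hbound : pvStepB sg (acc, p) (p + e + 1) = (acc ++ [(p, e + 1)], p + e + 1) := by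
          simp only [pvStepB]
          rw [if_pos (by
            rw [show p + e + 1 - 1 = p + e from rfl, run_getD sg p a t' ht e (by omega)]
            have hx : sg.getD (p + e + 1) [] = t'.getD e [] := by
              rw [show p + e + 1 = p + (e + 1) by omega, ← getD_drop, ht]
              simp
            rw [hx]
            exact ext_getD_ne a t' (by omega))]
          simp only [Prod.mk.injEq]
          refine ⟨by congr 1; simp; omega, by simp⟩
        have hdrop' : sg.drop (p + (e + 1)) = t'.drop e := by
          have h2 : sg.drop (p + (e + 1)) = (sg.drop p).drop (e + 1) := by
            rw [List.drop_drop, Nat.add_comm]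
          rw [h2, ht]; simp
        have hlen'' : (t'.drop e).length ≤ N := by
          rw [List.length_drop]; simp at hN; omega
        rw [hsplit, List.foldl_append, hkeep]
        rw [show List.range' (p + e + 1) (sg.length - (p + e + 1))
            = (p + e + 1) :: List.range' (p + e + 2) (sg.length - (p + e + 2)) by
          rw [show sg.length - (p + e + 1) = (sg.length - (p + e + 2)) + 1 by omega,
            List.range'_succ]]
        rw [List.foldl_cons, hbound]
        have h3 := ihN (t'.drop e) (p + (e + 1)) (acc ++ [(p, e + 1)]) hlen'' hdrop' hnext
        simp only [show p + (e + 1) = p + e + 1 by omega,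
          show p + e + 1 + 1 = p + e + 2 by omega] at h3
        rw [h3, hruns]
        simp
        congr 1

lemma loopA_small (k : List Int) (r : Int) (h1 : 0 < r) (h2 : r < 10) :
    pvDigitLoopA k r = k.set r.toNat 1 := by
  have hmod : PySem.Int.mod r 10 = r := by
    rw [PySem.Int.mod_eq_emod_of_pos (by omega)]; omega
  have hdiv : PySem.Int.floordiv r 10 = 0 := by
    rw [PySem.Int.floordiv_eq_ediv_of_pos (by omega)]; omega
  rw [pvDigitLoopA.eq_def, dif_pos h1, hmod, hdiv, pvDigitLoopA.eq_def, dif_neg (by omega)]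

lemma branch_eq (k : List Int) (r : Int) :
    (if 0 < r ∧ r < 10 then k.set r.toNat 1 else pvDigitLoopA k r) = pvDigitLoopA k r := by
  split_ifs with h
  · rw [loopA_small k r h.1 h.2]
  · rfl

lemma signature_eq (z : List Int) : signatureB z = digitsA z := by
  simp only [signatureB, digitsA, branch_eq]

-- ===== VERDICT (by name: the statement is the Claim_ definition above) =====
theorem show_second_sequence_spec : Claim_equal_show_second_sequence := by
  intro cl _ hpre
  obtain ⟨hne, hlen2⟩ := hpre
  unfold Spec_show_second_sequence
  obtain ⟨c, rest, rfl⟩ : ∃ c rest, cl = c :: rest := by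
    cases cl with
    | nil => exact absurd rfl hne
    | cons c rest => exact ⟨c, rest, rfl⟩
  have hsig : (c :: rest).map signatureB = (c :: rest).map digitsA := by
    simp [signature_eq]
  set R := pvBest (pvRuns ((c :: rest).map digitsA) 0) (1, 0) with hRdef
  have hA : show_second_sequence (c :: rest)
      = if 1 < R.1 then List.take R.1 (List.drop R.2 (c :: rest)) else [c] := by
    unfold show_second_sequence
    rw [List.range_eq_range']
    have h0 : [(PySem.List.pyGet? (c :: rest) 0).getD []] = [c] := by
      rw [PySem.List.pyGet?_zero_cons]; rfl
    rw [h0]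
    have hm := mainA (c :: rest) ((c :: rest).map digitsA).length
      ((c :: rest).map digitsA) 0 1 0 [c] le_rfl le_rfl (by simp)
    simp only [Nat.sub_zero, Nat.cast_one] at hm
    rw [hm]
  have hB : show_second_sequence_alt (c :: rest)
      = List.take R.1 (List.drop R.2 (c :: rest)) := by
    simp only [show_second_sequence_alt, hsig]
    have hb := mainB ((c :: rest).map digitsA) ((c :: rest).map digitsA).length
      ((c :: rest).map digitsA) 0 [] le_rfl (by simp) (by simp)
    simp only [Nat.zero_add, List.nil_append] at hb
    rw [hb, ← pvBest, ← hRdef, PySem.List.slice_natCast_add]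
  rw [hA, hB]
  by_cases h1 : 1 < R.1
  · rw [if_pos h1]
  · rw [if_neg h1]
    have hm := best_mono (pvRuns ((c :: rest).map digitsA) 0) (1, 0)
    rw [← hRdef] at hm
    have hR1 : R.1 = 1 := by simp at hm; omega
    have hst := best_stable (pvRuns ((c :: rest).map digitsA) 0) (1, 0) (by
      rw [← hRdef]; simpa using hR1)
    rw [← hRdef] at hst
    rw [hst]
    simp
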